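-- pv_equiv track=rewrite | github.com/ViperX7/formatEx | formatEx.py | cprinter
-- ===== SOURCE A (Python) =====
-- def cprinter(what):
--     for x in range(len(what)):
--         if x != 0:
--             what[-x] = what[-x] - what[-x - 1]
--
--     for x in range(len(what)):
--         if what[x] < 10:
--             what[x] = "B" * what[x]
--         else:
--             what[x] = "%" + str(what[x]) + "x"
--     return what
-- ===== SOURCE B (Python) =====
-- def cprinter(what):
--     prev = 0
--     for i in range(len(what)):
--         cur = what[i]
--         d = cur if i == 0 else cur - prev
--         what[i] = "B" * d if d < 10 else "%" + str(d) + "x"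
--         prev = cur
--     return what
-- ===== Notes on version B (the rewrite author's own statement) =====
-- stated objective: simpler
-- what changed: Replaces A's two passes (a backward negative-index diff pass over range(len), then a formatting pass) with a single forward loop that carries the previous original value in a local `prev` and formats each difference immediately.
import Mathlib
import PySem

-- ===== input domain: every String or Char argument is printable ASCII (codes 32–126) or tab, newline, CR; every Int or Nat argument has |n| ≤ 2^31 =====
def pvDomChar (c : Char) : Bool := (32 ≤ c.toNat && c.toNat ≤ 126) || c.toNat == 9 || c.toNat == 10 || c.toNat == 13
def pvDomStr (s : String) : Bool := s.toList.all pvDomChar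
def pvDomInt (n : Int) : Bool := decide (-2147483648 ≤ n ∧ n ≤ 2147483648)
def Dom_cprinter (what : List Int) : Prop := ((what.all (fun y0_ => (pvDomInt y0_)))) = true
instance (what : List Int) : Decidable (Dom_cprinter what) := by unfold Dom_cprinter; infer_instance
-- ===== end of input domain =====

-- B fuses A's two passes into one forward loop carrying the previous original value (simpler);
-- both Pythons mutate `what` in place identically, the equivalence proved here is about the return value.

-- shared formatting of one value: "B" * d if d < 10 else "%" + str(d) + "x"
-- ("B" * d ported as pyRepeat on the char list: exact, empty for d ≤ 0)
def pvFmt (d : Int) : String :=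
  if d < 10 then String.ofList (PySem.List.pyRepeat ['B'] d) else "%" ++ PySem.Int.toStr d ++ "x"

-- ===== PORT A =====
-- body of A's first loop: if x != 0: what[-x] = what[-x] - what[-x-1]
def cprinterStep (w : List Int) (x : Int) : List Int :=
  if x ≠ 0 then
    PySem.List.pySetD w (-x) (PySem.List.pyGetD w (-x) 0 - PySem.List.pyGetD w (-x - 1) 0)
  else w

def cprinter (what : List Int) : List String :=
  let w := (PySem.List.pyRange 0 (PySem.List.len what) 1).foldl cprinterStep what
  -- second loop: each iteration reads and overwrites only index x, hence a map
  w.map pvFmt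

-- ===== PORT B =====
-- the i ≥ 1 iterations of B's loop: cur - prev, format, advance prev
def cprinterAltGo (prev : Int) : List Int → List String
  | [] => []
  | cur :: rest => pvFmt (cur - prev) :: cprinterAltGo cur rest

def cprinter_alt (what : List Int) : List String :=
  match what with
  | [] => []
  | cur :: rest => pvFmt cur :: cprinterAltGo cur rest

-- ===== PRECONDITION & SPEC =====
def Spec_cprinter (what : List Int) (out : List String) : Prop := out = cprinter_alt what
instance (what : List Int) (out : List String) : Decidable (Spec_cprinter what out) := by unfold Spec_cprinter; infer_instance

-- ===== CLAIM (what is proved, stated in full; the proofs are below) =====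
def Claim_equal_cprinter : Prop := ∀ (what : List Int), Dom_cprinter what → Spec_cprinter what (cprinter what)

-- ===== LEMMAS AND PROOFS =====

-- the integer differences B formats: (ddiff prev l)[j] = l[j] - (previous element, prev before l)
def ddiff (prev : Int) : List Int → List Int
  | [] => []
  | c :: rest => (c - prev) :: ddiff c rest

lemma map_pvFmt_ddiff (prev : Int) (l : List Int) :
    (ddiff prev l).map pvFmt = cprinterAltGo prev l := by
  induction l generalizing prev with
  | nil => rfl
  | cons c rest ih => simp [ddiff, cprinterAltGo, ih]

lemma length_ddiff (prev : Int) (l : List Int) : (ddiff prev l).length = l.length := by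
  induction l generalizing prev with
  | nil => rfl
  | cons c rest ih => simp [ddiff, ih]

lemma cprinterStep_length (w : List Int) (x : Int) :
    (cprinterStep w x).length = w.length := by
  unfold cprinterStep
  split
  · simp [PySem.List.length_pySetD]
  · rfl

-- the step at 1 ≤ x ≤ |c| - 1 only touches indices ≥ 1 of a :: c
lemma cprinterStep_cons (a : Int) (c : List Int) (x : Int)
    (h1 : 1 ≤ x) (h2 : x + 1 ≤ (c.length : Int)) :
    cprinterStep (a :: c) x = a :: cprinterStep c x := by
  unfold cprinterStep
  rw [if_pos (by omega), if_pos (by omega)]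
  simp only [PySem.List.pySetD, PySem.List.pySet?, PySem.List.pyGetD, PySem.List.pyGet?,
    PySem.List.pyIdx?, List.length_cons]
  rw [if_neg (by omega), if_pos (by omega), if_neg (by omega), if_pos (by omega),
      if_neg (by omega), if_pos (by omega), if_neg (by omega), if_pos (by omega)]
  have hx : (-x).toNat = 0 := by omega
  have hx1 : (-(x+1)).toNat = 0 := by omega
  have e1 : c.length + 1 - x.toNat = (c.length - x.toNat) + 1 := by omega
  have e2 : c.length + 1 - (x + 1).toNat = (c.length - x.toNat) := by omega
  have e2' : c.length + 1 - (x + 1).toNat = (c.length - (x + 1).toNat) + 1 := by omega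
  have hneg : -(-x - 1) = x + 1 := by ring
  simp only [neg_neg, hneg, Option.map_some, Option.getD_some, Option.bind_some]
  rw [e1, e2']
  simp

lemma foldl_cprinterStep_cons (ps : List Int) (a : Int) (c : List Int)
    (h : ∀ x ∈ ps, 1 ≤ x ∧ x + 1 ≤ (c.length : Int)) :
    ps.foldl cprinterStep (a :: c) = a :: ps.foldl cprinterStep c := by
  induction ps generalizing c with
  | nil => rfl
  | cons p ps ih =>
      have hp := h p (by simp)
      rw [List.foldl_cons, List.foldl_cons, cprinterStep_cons a c p hp.1 hp.2, ih]
      intro x hx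
      have := h x (by simp [hx])
      rw [cprinterStep_length]; exact this

-- the last iteration x = n-1 sets index 1 to w[1] - w[0]
lemma cprinterStep_at_one (a b : Int) (l : List Int) :
    cprinterStep (a :: b :: l) ((l.length : Int) + 1) = a :: (b - a) :: l := by
  unfold cprinterStep
  rw [if_pos (by omega)]
  have c1 : -((l.length : Int) + 1) = -(((l.length + 1 : Nat) : Nat) : Int) := by push_cast; ring
  have c2 : -((l.length : Int) + 1) - 1 = -(((l.length + 2 : Nat) : Nat) : Int) := by push_cast; ring
  have hg1 : PySem.List.pyGetD (a :: b :: l) (-((l.length : Int) + 1)) 0 = b := by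
    rw [PySem.List.pyGetD, c1,
        PySem.List.pyGet?_neg_natCast (a :: b :: l) (l.length + 1) (by omega) (by simp)]
    simp
  have hg2 : PySem.List.pyGetD (a :: b :: l) (-((l.length : Int) + 1) - 1) 0 = a := by
    rw [PySem.List.pyGetD, c2,
        PySem.List.pyGet?_neg_natCast (a :: b :: l) (l.length + 2) (by omega) (by simp)]
    simp
  rw [hg1, hg2]
  have hidx : PySem.List.pyIdx? (a :: b :: l).length (-((l.length : Int) + 1)) = some 1 := by
    unfold PySem.List.pyIdx?
    rw [if_neg (by omega), if_pos (by simp; omega)]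
    simp
  rw [PySem.List.pySetD, PySem.List.pySet?, hidx]
  rfl

lemma loopA (t : List Int) (a : Int) :
    (PySem.List.pyRange 1 (((a :: t).length : Int)) 1).foldl cprinterStep (a :: t)
      = a :: ddiff a t := by
  induction t generalizing a with
  | nil =>
      rw [PySem.List.pyRange_one_eq_nil (by simp)]
      rfl
  | cons b r ih =>
      have hlen : ((a :: b :: r).length : Int) = (r.length : Int) + 2 := by simp; omega
      rw [hlen, show ((r.length : Int) + 2) = ((r.length : Int) + 1) + 1 from rfl,
          PySem.List.pyRange_one_succ_right (by omega),
          List.foldl_append, List.foldl_cons, List.foldl_nil]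
      have hpre : (PySem.List.pyRange 1 ((r.length : Int) + 1) 1).foldl cprinterStep (a :: b :: r)
          = a :: (PySem.List.pyRange 1 ((r.length : Int) + 1) 1).foldl cprinterStep (b :: r) := by
        apply foldl_cprinterStep_cons
        intro x hx
        rw [PySem.List.mem_pyRange_one] at hx
        constructor
        · exact hx.1
        · simp; omega
      rw [hpre]
      have hb : ((b :: r).length : Int) = (r.length : Int) + 1 := by simp
      rw [← hb, ih b, hb]
      have hl : (r.length : Int) + 1 = ((ddiff b r).length : Int) + 1 := by
        rw [length_ddiff]
      rw [hl, cprinterStep_at_one]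
      rfl

-- ===== VERDICT (by name: the statement is the Claim_ definition above) =====
theorem cprinter_spec : Claim_equal_cprinter := by
  intro what _
  unfold Spec_cprinter cprinter
  match what with
  | [] => rfl
  | a :: t =>
      simp only [PySem.List.len_eq]
      rw [PySem.List.pyRange_one_cons (by exact_mod_cast Nat.succ_pos t.length), List.foldl_cons]
      have h0 : cprinterStep (a :: t) 0 = a :: t := by simp [cprinterStep]
      rw [h0, show (0:Int) + 1 = 1 from rfl, loopA t a]
      simp [cprinter_alt, map_pvFmt_ddiff]
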